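-- pv_equiv track=rewrite | github.com/ch0ppy35/hobo-py | hobo.py | _find_col_temperature
-- ===== SOURCE A (Python) =====
-- def _find_col_temperature(headers):
--     for i, header in enumerate(headers):
--         if "High Res. Temp." in header or "High-Res Temp" in header:
--             return i
--     for i, header in enumerate(headers):
--         for s in ("Temp,", "Temp.", "Temperature"):
--             if s in header:
--                 return i
-- ===== SOURCE B (Python) =====
-- def _find_col_temperature(headers):
--     generic = None
--     for i, header in enumerate(headers):
--         if "High Res. Temp." in header or "High-Res Temp" in header:
--             return i
--         if generic is None and ("Temp," in header or "Temp." in header or "Temperature" in header):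
--             generic = i
--     return generic
-- ===== Notes on version B (the rewrite author's own statement) =====
-- stated objective: alternative
-- what changed: Replaces A's two sequential scans (high-res first, then generic) by a single pass that returns immediately on a high-res match and defers the first generic match in an accumulator returned after the loop.
import Mathlib
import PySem

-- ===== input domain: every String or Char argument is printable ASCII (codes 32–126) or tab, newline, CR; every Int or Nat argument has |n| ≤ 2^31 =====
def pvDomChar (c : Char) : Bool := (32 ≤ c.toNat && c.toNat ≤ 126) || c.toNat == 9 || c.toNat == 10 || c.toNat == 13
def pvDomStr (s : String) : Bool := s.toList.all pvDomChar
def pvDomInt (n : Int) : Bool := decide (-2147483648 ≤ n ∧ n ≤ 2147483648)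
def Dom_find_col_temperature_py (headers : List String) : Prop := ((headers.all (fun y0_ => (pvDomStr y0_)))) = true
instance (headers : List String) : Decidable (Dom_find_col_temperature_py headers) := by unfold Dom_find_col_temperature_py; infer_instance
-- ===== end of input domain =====

-- ===== PORT A =====
-- header comment: B merges A's two scans into one pass with a deferred generic match (alternative decomposition, same cost)
def pvAInner (i : Int) (header : String) : List String → Option Int
  | [] => none
  | s :: rest => if PySem.Str.isIn s header then some i else pvAInner i header rest

def pvALoop1 : List (Int × String) → Option Int
  | [] => none
  | (i, header) :: rest =>
    if PySem.Str.isIn "High Res. Temp." header || PySem.Str.isIn "High-Res Temp" header then some i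
    else pvALoop1 rest

def pvALoop2 : List (Int × String) → Option Int
  | [] => none
  | (i, header) :: rest =>
    match pvAInner i header ["Temp,", "Temp.", "Temperature"] with
    | some r => some r
    | none => pvALoop2 rest

def find_col_temperature_py (headers : List String) : Option Int :=
  match pvALoop1 (PySem.List.enumerate headers) with
  | some i => some i
  | none => pvALoop2 (PySem.List.enumerate headers)

-- ===== PORT B =====
def pvBLoop : List (Int × String) → Option Int → Option Int
  | [], generic => generic
  | (i, header) :: rest, generic =>
    if PySem.Str.isIn "High Res. Temp." header || PySem.Str.isIn "High-Res Temp" header then some i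
    else pvBLoop rest
      (if generic.isNone &&
          (PySem.Str.isIn "Temp," header || PySem.Str.isIn "Temp." header ||
           PySem.Str.isIn "Temperature" header) then some i else generic)

def find_col_temperature_py_alt (headers : List String) : Option Int :=
  pvBLoop (PySem.List.enumerate headers) none

-- ===== PRECONDITION & SPEC =====
def Spec_find_col_temperature_py (headers : List String) (out : Option Int) : Prop := out = find_col_temperature_py_alt headers
instance (headers : List String) (out : Option Int) : Decidable (Spec_find_col_temperature_py headers out) := by unfold Spec_find_col_temperature_py; infer_instance

-- ===== CLAIM =====
def Claim_equal_find_col_temperature_py : Prop := ∀ (headers : List String), Dom_find_col_temperature_py headers → Spec_find_col_temperature_py headers (find_col_temperature_py headers)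

-- ===== LEMMAS AND PROOFS =====
theorem pvBLoop_eq (l : List (Int × String)) : ∀ (g : Option Int),
    pvBLoop l g =
      match pvALoop1 l with
      | some i => some i
      | none => match g with
        | some j => some j
        | none => pvALoop2 l := by
  induction l with
  | nil => intro g; cases g <;> simp [pvBLoop, pvALoop1, pvALoop2]
  | cons p rest ih =>
    intro g
    obtain ⟨i, h⟩ := p
    simp only [pvBLoop, pvALoop1, pvALoop2, pvAInner]
    by_cases hh : (PySem.Str.isIn "High Res. Temp." h || PySem.Str.isIn "High-Res Temp" h) = true
    · simp_all
    · simp only [hh, Bool.false_eq_true, if_false]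
      rw [ih]
      cases g <;> cases hq : pvALoop1 rest <;>
        by_cases h1 : PySem.Str.isIn "Temp," h = true <;>
        by_cases h2 : PySem.Str.isIn "Temp." h = true <;>
        by_cases h3 : PySem.Str.isIn "Temperature" h = true <;>
        simp_all

-- ===== VERDICT =====
theorem find_col_temperature_py_spec : Claim_equal_find_col_temperature_py := by
  intro headers _
  unfold Spec_find_col_temperature_py find_col_temperature_py find_col_temperature_py_alt
  rw [pvBLoop_eq]
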